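-- pv_equiv track=rewrite | github.com/UltiRequiem/google-kick-start | 2022/milk_tea.py | generate_new_optimal
-- ===== SOURCE A (Python) =====
-- def generate_new_optimal(optimal: str, change_set: set):
--     opt = ""
--
--     for index, char in enumerate(optimal):
--         if index not in change_set:
--             opt += char
--         else:
--             if char == "1":
--                 opt += "0"
--             else:
--                 opt += "1"
--
--     return opt
-- ===== SOURCE B (Python) =====
-- def generate_new_optimal(optimal: str, change_set: set):
--     opt = list(optimal)
--     for idx in change_set:
--         if 0 <= idx < len(opt):
--             opt[idx] = "0" if opt[idx] == "1" else "1"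
--     return "".join(opt)
-- ===== Notes on version B (the rewrite author's own statement) =====
-- stated objective: alternative
-- what changed: B mutates a char buffer at only the indices in change_set (with a bounds guard) and joins it, instead of scanning every character of the string with a membership test against the set.
import Mathlib
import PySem

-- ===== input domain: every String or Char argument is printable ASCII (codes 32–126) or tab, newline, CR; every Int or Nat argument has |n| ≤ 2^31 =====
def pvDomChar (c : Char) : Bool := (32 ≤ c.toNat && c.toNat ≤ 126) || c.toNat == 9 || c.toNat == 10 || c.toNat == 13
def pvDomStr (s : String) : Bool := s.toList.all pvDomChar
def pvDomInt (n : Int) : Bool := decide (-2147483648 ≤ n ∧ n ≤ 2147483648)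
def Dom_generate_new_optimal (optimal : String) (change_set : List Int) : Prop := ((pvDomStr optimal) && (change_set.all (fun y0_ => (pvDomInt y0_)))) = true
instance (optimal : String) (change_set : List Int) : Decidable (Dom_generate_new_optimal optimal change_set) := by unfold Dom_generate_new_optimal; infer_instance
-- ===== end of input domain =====

-- B flips only the listed in-range indices in a mutable buffer and joins it, instead of scanning
-- the whole string with a per-character membership test (objective: alternative traversal).

-- ===== PORT A =====
def generate_new_optimal (optimal : String) (change_set : List Int) : String :=
  (PySem.List.enumerate optimal.toList).foldl
    (fun opt p =>
      if ¬ change_set.contains p.1 then opt.push p.2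
      else if p.2 = '1' then opt.push '0' else opt.push '1')
    ""

-- ===== PORT B =====
def generate_new_optimal_alt (optimal : String) (change_set : List Int) : String :=
  String.ofList (change_set.foldl
    (fun opt idx =>
      if 0 ≤ idx ∧ idx < (opt.length : Int) then
        opt.set idx.toNat (if opt[idx.toNat]! = '1' then '0' else '1')
      else opt)
    optimal.toList)

-- ===== PRECONDITION & SPEC =====
-- change_set is a Python set, so by the type convention its List Int stand-in holds DISTINCT
-- elements; Pre_ states exactly that set-ness (no input of A's actual set-typed domain is excluded).
def Pre_generate_new_optimal (optimal : String) (change_set : List Int) : Prop := change_set.Nodup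
instance (optimal : String) (change_set : List Int) : Decidable (Pre_generate_new_optimal optimal change_set) := by unfold Pre_generate_new_optimal; infer_instance
def pvWitness_generate_new_optimal : String × List Int := ("1010a", [0, 2, -1, 9])
def Spec_generate_new_optimal (optimal : String) (change_set : List Int) (out : String) : Prop := out = generate_new_optimal_alt optimal change_set
instance (optimal : String) (change_set : List Int) (out : String) : Decidable (Spec_generate_new_optimal optimal change_set out) := by unfold Spec_generate_new_optimal; infer_instance

-- ===== CLAIM (what is proved, stated in full; the proofs are below) =====
def Claim_equal_generate_new_optimal : Prop := ∀ (optimal : String) (change_set : List Int), Dom_generate_new_optimal optimal change_set → Pre_generate_new_optimal optimal change_set → Spec_generate_new_optimal optimal change_set (generate_new_optimal optimal change_set)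

-- ===== LEMMAS AND PROOFS =====

/-- The flipped character list both programs build, as a pure map indexed from `s`. -/
def pvFlipped (cs : List Int) : List Char → Int → List Char
  | [], _ => []
  | c :: t, s => (if cs.contains s then (if c = '1' then '0' else '1') else c) :: pvFlipped cs t (s + 1)

theorem pvFlipped_getElem? (cs : List Int) (l : List Char) (s : Int) (i : Nat) :
    (pvFlipped cs l s)[i]? =
      l[i]?.map (fun c => if cs.contains (s + i) then (if c = '1' then '0' else '1') else c) := by
  induction l generalizing s i with
  | nil => simp [pvFlipped]
  | cons c t ih =>
    cases i with
    | zero => simp [pvFlipped]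
    | succ j =>
      simp only [pvFlipped, List.getElem?_cons_succ, ih]
      have : s + 1 + (j : Int) = s + (j + 1 : Nat) := by push_cast; ring
      rw [this]

/-- A's accumulator fold over `enumerate` appends the flipped tail. -/
theorem pvA_fold (cs : List Int) (l : List Char) (s : Int) (acc : String) :
    ((PySem.List.enumerate l s).foldl
      (fun opt p =>
        if ¬ cs.contains p.1 then opt.push p.2
        else if p.2 = '1' then opt.push '0' else opt.push '1') acc).toList
    = acc.toList ++ pvFlipped cs l s := by
  induction l generalizing s acc with
  | nil => simp [PySem.List.enumerate_nil, pvFlipped]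
  | cons c t ih =>
    rw [PySem.List.enumerate_cons, List.foldl_cons, ih]
    simp only [pvFlipped]
    by_cases h : s ∈ cs <;>
      by_cases h1 : c = '1' <;>
        simp [h, h1]

/-- B's fold over a duplicate-free index list computes the flipped string pointwise. -/
theorem pvB_fold (cs : List Int) (l : List Char) (h : cs.Nodup) (i : Nat) :
    (cs.foldl
      (fun opt idx =>
        if 0 ≤ idx ∧ idx < (opt.length : Int) then
          opt.set idx.toNat (if opt[idx.toNat]! = '1' then '0' else '1')
        else opt) l)[i]? =
    l[i]?.map (fun c => if cs.contains (i : Int) then (if c = '1' then '0' else '1') else c) := by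
  induction cs generalizing l with
  | nil => cases h' : l[i]? <;> simp [h']
  | cons a rest ih =>
    have hna : a ∉ rest := (List.nodup_cons.mp h).1
    have hrest : rest.Nodup := (List.nodup_cons.mp h).2
    rw [List.foldl_cons, ih _ hrest]
    by_cases hai : a = (i : Int)
    · have htn : a.toNat = i := by omega
      have hm : ¬ ((i : Int) ∈ rest) := hai ▸ hna
      by_cases hlt : (i : Int) < (l.length : Int)
      · have hi : i < l.length := by exact_mod_cast hlt
        have hguard : 0 ≤ a ∧ a < (l.length : Int) := by omega
        rw [if_pos hguard, htn]
        have _hgb : l[i]! = l[i] := getElem!_pos l i hi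
        simp [hi, ← hai]
        exact fun hcon => absurd hcon hna
      · have hguard : ¬ (0 ≤ a ∧ a < (l.length : Int)) := by omega
        rw [if_neg hguard]
        have hnone : l[i]? = none := by
          apply List.getElem?_eq_none
          omega
        simp [hnone]
    · have hc : (a :: rest).contains (i : Int) = rest.contains (i : Int) := by
        simp [Ne.symm hai]
      rw [hc]
      by_cases hguard : 0 ≤ a ∧ a < (l.length : Int)
      · rw [if_pos hguard]
        have hne : a.toNat ≠ i := by omega
        rw [List.getElem?_set_ne hne]
      · rw [if_neg hguard]

-- ===== VERDICT (by name: the statement is the Claim_ definition above) =====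
theorem generate_new_optimal_spec : Claim_equal_generate_new_optimal := by
  intro optimal cs _ hpre
  unfold Spec_generate_new_optimal generate_new_optimal generate_new_optimal_alt
  have hA := pvA_fold cs optimal.toList 0 ""
  have hlist : pvFlipped cs optimal.toList 0 =
      cs.foldl
        (fun opt idx =>
          if 0 ≤ idx ∧ idx < (opt.length : Int) then
            opt.set idx.toNat (if opt[idx.toNat]! = '1' then '0' else '1')
          else opt) optimal.toList := by
    apply List.ext_getElem?
    intro i
    rw [pvFlipped_getElem?, pvB_fold cs optimal.toList hpre i]
    simp
  have htl : (String.ofList (pvFlipped cs optimal.toList 0)).toList =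
      ((PySem.List.enumerate optimal.toList 0).foldl
        (fun opt p =>
          if ¬ cs.contains p.1 then opt.push p.2
          else if p.2 = '1' then opt.push '0' else opt.push '1') "").toList := by
    rw [hA]; simp
  have := congrArg String.ofList htl
  simpa [hlist] using this.symm
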